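-- pv_equiv track=rewrite | github.com/amruth-srinivas/Flowdesk-source | uploads/tickets/098b3c18-ff37-4429-bcd4-6835afbe6afc/20def1dd2c7c4b3891a2bd55c50ed037.py | extract_image_type_from_filename
-- ===== SOURCE A (Python) =====
-- from typing import List, Dict, Any, Optional, Set, Iterator
--
-- def extract_image_type_from_filename(filename: str) -> Optional[str]:
--     """
--     Extract image type token from filename.
--
--     Supported patterns include (examples):
--     - A50340B_Z_240925_162405.jpg
--     - A89766B_JIN_Z_240925_162405.jpg
--
--     The type is identified by finding a single-letter token that is surrounded by
--     underscores in the original filename (i.e. one of the underscore-separated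
--     parts equals A/B/Z/T).
--
--     Token mapping:
--     - _A_ -> post (after assembly)
--     - _B_ -> pre (before assembly)
--     - _Z_ -> bad (defective)
--     - _T_ -> trim (after trim / before frame)
--
--     Args:
--         filename: The file name (e.g., "A50340B_Z_240925_162405.jpg")
--
--     Returns:
--         Type string: 'post', 'pre', 'bad', or None if can't determine
--     """
--     # Remove extension
--     name_without_ext = filename.rsplit('.', 1)[0]
--
--     # Split by underscore to get parts
--     parts = name_without_ext.split('_')
--
--     if len(parts) < 2:
--         return None  # Invalid filename format
--
--     # Map token to type
--     type_mapping = {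
--         'A': 'post',
--         'B': 'pre',
--         'Z': 'bad',
--         'T': 'trim',
--     }
--
--     # Find the first single-letter token (A/B/Z/T) among underscore-separated parts.
--     # This supports filenames like: A89766B_JIN_Z_240925_162405.jpg
--     token = next(
--         (p.upper() for p in parts if len(p) == 1 and p.upper() in type_mapping),
--         None,
--     )
--
--     return type_mapping.get(token)
-- ===== SOURCE B (Python) =====
-- from typing import Optional
--
--
-- def extract_image_type_from_filename(filename: str) -> Optional[str]:
--     """One streaming pass over the name: track the length and last char of the
--     current underscore-separated run; no parts list is ever built."""
--     name = filename.rsplit('.', 1)[0]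
--     if '_' not in name:
--         return None
--     mapping = {'A': 'post', 'B': 'pre', 'Z': 'bad', 'T': 'trim'}
--     runlen = 0
--     ch = ' '  # placeholder; only read when runlen == 1
--     for c in name:
--         if c == '_':
--             if runlen == 1:
--                 t = mapping.get(ch.upper())
--                 if t is not None:
--                     return t
--             runlen = 0
--         else:
--             runlen += 1
--             ch = c
--     if runlen == 1:
--         return mapping.get(ch.upper())
--     return None
-- ===== Notes on version B (the rewrite author's own statement) =====
-- stated objective: alternative
-- what changed: Replaces split-into-parts-then-scan with a single streaming pass over the characters that tracks only the length and last character of the current underscore-separated run, building no parts list.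
import Mathlib
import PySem

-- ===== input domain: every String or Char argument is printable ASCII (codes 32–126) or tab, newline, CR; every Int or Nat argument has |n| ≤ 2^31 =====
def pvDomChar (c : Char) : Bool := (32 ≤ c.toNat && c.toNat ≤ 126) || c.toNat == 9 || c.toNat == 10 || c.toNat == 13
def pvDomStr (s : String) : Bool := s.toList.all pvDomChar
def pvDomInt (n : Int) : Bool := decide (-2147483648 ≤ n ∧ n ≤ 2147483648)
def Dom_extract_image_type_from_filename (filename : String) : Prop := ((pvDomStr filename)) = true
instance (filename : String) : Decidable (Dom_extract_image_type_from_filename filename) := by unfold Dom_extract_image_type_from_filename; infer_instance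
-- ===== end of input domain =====

-- B replaces split-into-a-parts-list-then-scan by one streaming pass that tracks only the
-- current run's length and last character (objective: alternative, same cost).

-- ===== PORT A =====
-- hand port of `filename.rsplit('.', 1)[0]` (PySem has no rsplit): everything before the
-- LAST '.', or the whole string if there is no '.' — exact on every input
def pvStripExt : List Char → List Char
  | [] => []
  | c :: rest =>
      if '.' ∈ rest then c :: pvStripExt rest
      else if c = '.' then [] else c :: pvStripExt rest

-- the literal dict `type_mapping`
def pvTypeMapping : PySem.Dict (List Char) String :=
  PySem.Dict.ofList [(['A'], "post"), (['B'], "pre"), (['Z'], "bad"), (['T'], "trim")]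

def extract_image_type_from_filename (filename : String) : Option String :=
  let name_without_ext := pvStripExt filename.toList
  let parts := PySem.Chars.splitOn name_without_ext ['_']
  if parts.length < 2 then none
  else
    -- next((p.upper() for p in parts if len(p) == 1 and p.upper() in type_mapping), None)
    let token := (parts.find? (fun p =>
        p.length == 1 && pvTypeMapping.contains (PySem.Chars.upper p))).map PySem.Chars.upper
    match token with
    | none => none
    | some t => pvTypeMapping.get? t   -- type_mapping.get(token); get(None) is None

-- ===== PORT B =====
-- B's dict literal `mapping` (same literal as A's `type_mapping`)
def pvMappingB : PySem.Dict (List Char) String :=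
  PySem.Dict.ofList [(['A'], "post"), (['B'], "pre"), (['Z'], "bad"), (['T'], "trim")]

-- B's for-loop over the chars of name: runlen/ch are the length and last char of the
-- current underscore-separated run; the [] case is the code after the loop
def pvScanB : Nat → Char → List Char → Option String
  | runlen, ch, [] => if runlen = 1 then pvMappingB.get? (PySem.Chars.upper [ch]) else none
  | runlen, ch, c :: rest =>
      if c = '_' then
        if runlen = 1 then
          match pvMappingB.get? (PySem.Chars.upper [ch]) with
          | some t => some t
          | none => pvScanB 0 ch rest
        else pvScanB 0 ch rest
      else pvScanB (runlen + 1) c rest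

def extract_image_type_from_filename_alt (filename : String) : Option String :=
  let name := pvStripExt filename.toList
  if PySem.Chars.isIn ['_'] name = false then none
  else pvScanB 0 ' ' name   -- Python's `ch = ' '` placeholder; only read when runlen == 1

-- ===== PRECONDITION & SPEC =====
def Spec_extract_image_type_from_filename (filename : String) (out : Option String) : Prop := out = extract_image_type_from_filename_alt filename
instance (filename : String) (out : Option String) : Decidable (Spec_extract_image_type_from_filename filename out) := by unfold Spec_extract_image_type_from_filename; infer_instance

-- ===== CLAIM (what is proved, stated in full; the proofs are below) =====
def Claim_equal_extract_image_type_from_filename : Prop := ∀ (filename : String), Dom_extract_image_type_from_filename filename → Spec_extract_image_type_from_filename filename (extract_image_type_from_filename filename)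

-- ===== LEMMAS AND PROOFS =====

-- reference structural recursion for Python's name.split('_')
def pvSplitU : List Char → List (List Char)
  | [] => [[]]
  | c :: rest => if c = '_' then [] :: pvSplitU rest else (pvSplitU rest).modifyHead (c :: ·)

theorem pvMB_eq : pvMappingB = pvTypeMapping := rfl

theorem pvSplitU_ne_nil (cs : List Char) : pvSplitU cs ≠ [] := by
  induction cs with
  | nil => simp [pvSplitU]
  | cons c rest ih =>
    simp only [pvSplitU]
    split
    · simp
    · cases h : pvSplitU rest with
      | nil => exact absurd h ih
      | cons a l => simp [List.modifyHead]

theorem pv_go_spec (fuel : Nat) : ∀ (l cur : List Char) (acc : List (List Char)),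
    l.length < fuel →
    PySem.Chars.splitOn.go ['_'] fuel l cur acc
      = acc.reverse ++ (pvSplitU l).modifyHead (cur.reverse ++ ·) := by
  induction fuel with
  | zero => intro l cur acc h; omega
  | succ fuel ih =>
    intro l cur acc h
    cases l with
    | nil =>
      rw [PySem.Chars.splitOn.go.eq_def]
      simp [pvSplitU]
    | cons c rest =>
      rw [PySem.Chars.splitOn.go.eq_def]
      simp only []
      by_cases hc : c = '_'
      · subst hc
        have hp : List.isPrefixOf ['_'] ('_' :: rest) = true := by
          simp [List.isPrefixOf]
        simp only [hp, if_pos]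
        rw [ih _ _ _ (by simpa using Nat.lt_of_succ_lt_succ h)]
        cases hsp : pvSplitU rest with
        | nil => exact absurd hsp (pvSplitU_ne_nil rest)
        | cons a l => simp [pvSplitU, hsp, List.modifyHead]
      · have hp : List.isPrefixOf ['_'] (c :: rest) = false := by
          simp only [List.isPrefixOf, Bool.and_eq_false_imp]
          simp [Ne.symm hc]
        simp only [hp]
        rw [if_neg (by simp)]
        rw [ih _ _ _ (by simpa using Nat.lt_of_succ_lt_succ h)]
        simp only [pvSplitU, if_neg hc]
        cases hsp : pvSplitU rest with
        | nil => exact absurd hsp (pvSplitU_ne_nil rest)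
        | cons a l => simp [List.modifyHead]

theorem pv_splitOn_eq (cs : List Char) :
    PySem.Chars.splitOn cs ['_'] = pvSplitU cs := by
  rw [PySem.Chars.splitOn, pv_go_spec (cs.length + 1) cs [] [] (by omega)]
  cases h : pvSplitU cs with
  | nil => exact absurd h (pvSplitU_ne_nil cs)
  | cons a l => simp [List.modifyHead]

-- A's selection over a parts list, abbreviated for the proofs
def pvQ (p : List Char) : Bool := p.length == 1 && pvTypeMapping.contains (PySem.Chars.upper p)

def pvARes (P : List (List Char)) : Option String :=
  match (P.find? pvQ).map PySem.Chars.upper with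
  | none => none
  | some t => pvTypeMapping.get? t

theorem pvARes_cons (p : List Char) (P : List (List Char)) :
    pvARes (p :: P) = if pvQ p then pvTypeMapping.get? (PySem.Chars.upper p) else pvARes P := by
  simp only [pvARes, List.find?]
  by_cases h : pvQ p = true <;> simp [h]

theorem pv_get_none (t : List Char) (h : pvTypeMapping.contains t = false) :
    pvTypeMapping.get? t = none := by
  rw [PySem.Dict.get?_eq_none_iff_contains]; exact h

-- the loop invariant: B's streaming scan computes A's first-qualifying-part lookup,
-- where cur is the content of the current run (length runlen, last char ch)
theorem pv_scan (cs : List Char) : ∀ (runlen : Nat) (ch : Char) (cur : List Char),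
    cur.length = runlen → (runlen = 1 → cur = [ch]) →
    pvScanB runlen ch cs = pvARes ((pvSplitU cs).modifyHead (cur ++ ·)) := by
  induction cs with
  | nil =>
    intro runlen ch cur hl h1
    simp only [pvScanB, pvSplitU, List.modifyHead, List.append_nil, pvMB_eq]
    rw [pvARes_cons]
    by_cases hr : runlen = 1
    · have hc : cur = [ch] := h1 hr
      subst hc
      simp only [hr, pvQ]
      by_cases hcont : pvTypeMapping.contains (PySem.Chars.upper [ch]) = true
      · simp [hcont]
      · simp only [Bool.not_eq_true] at hcont
        simp [hcont, pv_get_none _ hcont, pvARes, List.find?]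
    · have hq : pvQ cur = false := by
        simp [pvQ]
        intro h; exact absurd (hl ▸ h) hr
      simp [hr, hq, pvARes, List.find?]
  | cons c rest ih =>
    intro runlen ch cur hl h1
    by_cases hc : c = '_'
    · subst hc
      have hR : List.modifyHead (fun x => cur ++ x) (pvSplitU ('_' :: rest)) = cur :: pvSplitU rest := by
        simp [pvSplitU, List.modifyHead]
      rw [hR, pvARes_cons]
      have hrec : pvScanB 0 ch rest = pvARes (pvSplitU rest) := by
        rw [ih 0 ch [] rfl (by omega)]
        cases hsp : pvSplitU rest with
        | nil => exact absurd hsp (pvSplitU_ne_nil rest)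
        | cons a l => simp [List.modifyHead]
      by_cases hr : runlen = 1
      · have hcur : cur = [ch] := h1 hr
        subst hcur
        have hq : pvQ [ch] = pvTypeMapping.contains (PySem.Chars.upper [ch]) := by simp [pvQ]
        by_cases hcont : pvTypeMapping.contains (PySem.Chars.upper [ch]) = true
        · rcases ho : pvTypeMapping.get? (PySem.Chars.upper [ch]) with _ | t
          · rw [PySem.Dict.get?_eq_none_iff_contains] at ho; simp [ho] at hcont
          · simp [pvScanB, pvMB_eq, hr, ho, hq, hcont]
        · simp only [Bool.not_eq_true] at hcont
          simp [pvScanB, pvMB_eq, hr, hq, hcont, pv_get_none _ hcont, hrec]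
      · have hq : pvQ cur = false := by
          simp [pvQ]
          intro h; exact absurd (hl ▸ h) hr
        simp [pvScanB, hr, hq, hrec]
    · simp only [pvScanB, if_neg hc]
      have hcur' : runlen + 1 = 1 → cur ++ [c] = [c] := by
        intro h
        have h0 : cur = [] := List.length_eq_zero_iff.mp (by omega)
        simp [h0]
      rw [ih (runlen + 1) c (cur ++ [c]) (by simp [hl]) hcur']
      cases hsp : pvSplitU rest with
      | nil => exact absurd hsp (pvSplitU_ne_nil rest)
      | cons a l => simp [pvSplitU, hc, hsp, List.modifyHead]

-- A's `len(parts) < 2` is B's `'_' not in name`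
theorem pv_guard (cs : List Char) :
    (pvSplitU cs).length < 2 ↔ PySem.Chars.isIn ['_'] cs = false := by
  rw [PySem.Chars.isIn_eq_false_iff, List.singleton_infix_iff]
  induction cs with
  | nil => simp [pvSplitU]
  | cons c rest ih =>
    by_cases hc : c = '_'
    · subst hc
      have := pvSplitU_ne_nil rest
      simp [pvSplitU]
      cases h : pvSplitU rest with
      | nil => exact absurd h this
      | cons a l => simp
    · simp [pvSplitU, hc, List.length_modifyHead, ih, Ne.symm hc]

-- ===== VERDICT (by name: the statement is the Claim_ definition above) =====
theorem extract_image_type_from_filename_spec : Claim_equal_extract_image_type_from_filename := by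
  intro filename _
  unfold Spec_extract_image_type_from_filename
  unfold extract_image_type_from_filename extract_image_type_from_filename_alt
  simp only [pv_splitOn_eq]
  by_cases hg : (pvSplitU (pvStripExt filename.toList)).length < 2
  · rw [if_pos hg, if_pos ((pv_guard _).mp hg)]
  · rw [if_neg hg, if_neg (fun h => hg ((pv_guard _).mpr h))]
    rw [pv_scan _ 0 ' ' [] rfl (by omega)]
    cases hsp : pvSplitU (pvStripExt filename.toList) with
    | nil => exact absurd hsp (pvSplitU_ne_nil _)
    | cons a l =>
      simp only [List.modifyHead, pvARes, List.nil_append]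
      rfl
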